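-- pv_equiv track=rewrite | github.com/jisujr/TD1-epita | Ex02.py | multiplication_egyptienne
-- ===== SOURCE A (Python) =====
-- def multiplication_egyptienne(x, y):
--     resultat = 0
--     while y > 0:
--         if y % 2 != 0:  # Si y est impair
--             resultat += x  # On ajoute x au résultat
--         x *= 2  # On double x
--         y //= 2  # On divise y par 2 (division entière)
--     return resultat
-- ===== SOURCE B (Python) =====
-- def multiplication_egyptienne(x, y):
--     return x * y if y > 0 else 0
-- ===== Notes on version B (the rewrite author's own statement) =====
-- stated objective: faster
-- what changed: Replaced the doubling/halving loop by the closed form x*y when y>0 and 0 otherwise (the loop never runs for y<=0).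
import Mathlib
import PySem

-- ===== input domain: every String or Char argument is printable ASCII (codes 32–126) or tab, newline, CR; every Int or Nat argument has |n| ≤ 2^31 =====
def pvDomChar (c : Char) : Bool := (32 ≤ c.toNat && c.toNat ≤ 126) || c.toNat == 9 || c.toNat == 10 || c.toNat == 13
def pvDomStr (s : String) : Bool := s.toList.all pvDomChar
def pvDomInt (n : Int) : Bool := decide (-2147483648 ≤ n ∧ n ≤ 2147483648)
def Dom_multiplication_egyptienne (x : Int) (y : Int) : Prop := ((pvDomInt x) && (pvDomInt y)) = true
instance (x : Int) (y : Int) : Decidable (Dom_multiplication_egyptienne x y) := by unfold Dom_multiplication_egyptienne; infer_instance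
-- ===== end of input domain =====

-- B replaces A's Egyptian doubling/halving loop by the closed form x*y (0 when y ≤ 0): O(1) vs O(log y) iterations.
-- ===== PORT A =====
-- literal port of A's while-loop (state: resultat, x, y), recursion on y.toNat
def pvLoopA (resultat x y : Int) : Int :=
  if h : y > 0 then
    pvLoopA (if PySem.Int.mod y 2 ≠ 0 then resultat + x else resultat) (x * 2) (PySem.Int.floordiv y 2)
  else resultat
termination_by y.toNat
decreasing_by
  have := PySem.Int.floordiv_eq_ediv_of_pos (a := y) (b := 2) (by omega)
  rw [this]; omega

def multiplication_egyptienne (x : Int) (y : Int) : Int := pvLoopA 0 x y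

-- ===== PORT B =====
def multiplication_egyptienne_alt (x : Int) (y : Int) : Int := if y > 0 then x * y else 0

-- ===== PRECONDITION & SPEC =====
def Spec_multiplication_egyptienne (x : Int) (y : Int) (out : Int) : Prop := out = multiplication_egyptienne_alt x y
instance (x : Int) (y : Int) (out : Int) : Decidable (Spec_multiplication_egyptienne x y out) := by unfold Spec_multiplication_egyptienne; infer_instance

-- ===== CLAIM (what is proved, stated in full; the proofs are below) =====
def Claim_equal_multiplication_egyptienne : Prop := ∀ (x : Int) (y : Int), Dom_multiplication_egyptienne x y → Spec_multiplication_egyptienne x y (multiplication_egyptienne x y)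

-- ===== LEMMAS AND PROOFS =====
-- loop invariant: pvLoopA r x y = r + x*y for y > 0, and = r otherwise
theorem pvLoopA_eq (r x y : Int) : pvLoopA r x y = if y > 0 then r + x * y else r := by
  induction r, x, y using pvLoopA.induct with
  | case1 r x y h ih =>
    simp only [dite_eq_ite] at ih
    rw [pvLoopA, dif_pos h, ih]
    have hdm := PySem.Int.floordiv_mul_add_mod y 2
    have hm := PySem.Int.mod_eq_emod_of_pos (a := y) (b := 2) (by omega)
    have hd := PySem.Int.floordiv_eq_ediv_of_pos (a := y) (b := 2) (by omega)
    rw [hm] at hdm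
    rw [hd, hm]
    split_ifs with h1 h2 h2
    · have hy : y = 2 * (y / 2) + 1 := by omega
      generalize hq : y / 2 = q at hy ⊢
      rw [hy]; ring
    · have hy : y = 2 * (y / 2) := by omega
      generalize hq : y / 2 = q at hy ⊢
      rw [hy]; ring
    · have hy : y = 1 := by omega
      rw [hy]; ring
    · omega
  | case2 r x y h =>
    rw [pvLoopA, dif_neg h, if_neg h]

-- ===== VERDICT (by name: the statement is the Claim_ definition above) =====
theorem multiplication_egyptienne_spec : Claim_equal_multiplication_egyptienne := by
  intro x y _
  unfold Spec_multiplication_egyptienne multiplication_egyptienne multiplication_egyptienne_alt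
  rw [pvLoopA_eq]; split_ifs <;> ring
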